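-- pv_equiv track=rewrite | github.com/mangow0527/text2cypher-agent-hub | agents/cypher-generator-agent/app/preflight.py | _has_unbalanced_brackets
-- ===== SOURCE A (Python) =====
-- def _has_unbalanced_brackets(query: str) -> bool:
--     pairs = {")": "(", "]": "[", "}": "{"}
--     openers = set(pairs.values())
--     stack: list[str] = []
--     quote: str | None = None
--     escaped = False
--     for char in query:
--         if quote:
--             if escaped:
--                 escaped = False
--             elif char == "\\":
--                 escaped = True
--             elif char == quote:
--                 quote = None
--             continue
--         if char in {"'", '"'}:
--             quote = char
--         elif char in openers:
--             stack.append(char)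
--         elif char in pairs:
--             if not stack or stack.pop() != pairs[char]:
--                 return True
--     return bool(stack)
-- ===== SOURCE B (Python) =====
-- def _has_unbalanced_brackets(query: str) -> bool:
--     # Pass 1: strip quoted string literals (escapes honored inside quotes;
--     # an unterminated quote swallows the rest).
--     cleaned = []
--     quote = None
--     escaped = False
--     for char in query:
--         if quote is None:
--             if char in "'\"":
--                 quote = char
--             else:
--                 cleaned.append(char)
--         elif escaped:
--             escaped = False
--         elif char == "\\":
--             escaped = True
--         elif char == quote:
--             quote = None
--     # Pass 2: plain stack-based balance check over the cleaned characters.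
--     pairs = {")": "(", "]": "[", "}": "{"}
--     stack = []
--     for char in cleaned:
--         if char in "([{":
--             stack.append(char)
--         elif char in pairs:
--             if not stack or stack.pop() != pairs[char]:
--                 return True
--     return bool(stack)
-- ===== Notes on version B (the rewrite author's own statement) =====
-- stated objective: simpler
-- what changed: A's single interleaved quote-tracking/bracket-stack loop is split into two sequential plain loops: pass 1 strips quoted literals into a cleaned character list, pass 2 runs an ordinary stack balance check over it.
import Mathlib
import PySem

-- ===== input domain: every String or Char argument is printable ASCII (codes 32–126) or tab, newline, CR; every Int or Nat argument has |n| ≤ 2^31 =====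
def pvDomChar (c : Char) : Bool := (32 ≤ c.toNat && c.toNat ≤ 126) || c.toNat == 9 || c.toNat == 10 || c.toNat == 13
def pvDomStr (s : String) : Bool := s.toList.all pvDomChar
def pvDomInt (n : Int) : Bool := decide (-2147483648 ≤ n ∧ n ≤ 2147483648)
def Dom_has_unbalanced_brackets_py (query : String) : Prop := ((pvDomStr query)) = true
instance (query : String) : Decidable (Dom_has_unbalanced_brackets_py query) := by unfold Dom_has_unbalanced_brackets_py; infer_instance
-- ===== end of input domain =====

-- B replaces A's single interleaved quote/bracket loop by two sequential plain loops
-- (strip quoted literals, then a stack balance check); simpler, same cost.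

-- ===== PORT A =====
-- pairs[char] for the three closers
def pvPairOf (c : Char) : Char :=
  if c = ')' then '(' else if c = ']' then '[' else '{'

-- A's single loop: stack (top at the end, as Python append/pop), quote state, escaped flag
def pvLoopA : List Char → List Char → Option Char → Bool → Bool
  | [], stack, _, _ => !stack.isEmpty
  | c :: cs, stack, some q, escaped =>
    if escaped then pvLoopA cs stack (some q) false
    else if c = '\\' then pvLoopA cs stack (some q) true
    else if c = q then pvLoopA cs stack none escaped
    else pvLoopA cs stack (some q) escaped
  | c :: cs, stack, none, escaped =>
    if c = '\'' ∨ c = '"' then pvLoopA cs stack (some c) escaped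
    else if c = '(' ∨ c = '[' ∨ c = '{' then pvLoopA cs (stack ++ [c]) none escaped
    else if c = ')' ∨ c = ']' ∨ c = '}' then
      match stack.getLast? with
      | none => true
      | some t => if t ≠ pvPairOf c then true else pvLoopA cs stack.dropLast none escaped
    else pvLoopA cs stack none escaped

def has_unbalanced_brackets_py (query : String) : Bool :=
  pvLoopA query.toList [] none false

-- ===== PORT B =====
-- pass 1: drop quoted literals, keep every character seen outside quotes
def pvClean : List Char → Option Char → Bool → List Char
  | [], _, _ => []
  | c :: cs, none, escaped =>
    if c = '\'' ∨ c = '"' then pvClean cs (some c) escaped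
    else c :: pvClean cs none escaped
  | c :: cs, some q, escaped =>
    if escaped then pvClean cs (some q) false
    else if c = '\\' then pvClean cs (some q) true
    else if c = q then pvClean cs none escaped
    else pvClean cs (some q) escaped

-- pass 2: ordinary stack balance check
def pvBalance : List Char → List Char → Bool
  | [], stack => !stack.isEmpty
  | c :: cs, stack =>
    if c = '(' ∨ c = '[' ∨ c = '{' then pvBalance cs (stack ++ [c])
    else if c = ')' ∨ c = ']' ∨ c = '}' then
      match stack.getLast? with
      | none => true
      | some t => if t ≠ pvPairOf c then true else pvBalance cs stack.dropLast
    else pvBalance cs stack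

def has_unbalanced_brackets_py_alt (query : String) : Bool :=
  pvBalance (pvClean query.toList none false) []

-- ===== PRECONDITION & SPEC =====
def Spec_has_unbalanced_brackets_py (query : String) (out : Bool) : Prop := out = has_unbalanced_brackets_py_alt query
instance (query : String) (out : Bool) : Decidable (Spec_has_unbalanced_brackets_py query out) := by unfold Spec_has_unbalanced_brackets_py; infer_instance

-- ===== CLAIM (what is proved, stated in full; the proofs are below) =====
def Claim_equal_has_unbalanced_brackets_py : Prop := ∀ (query : String), Dom_has_unbalanced_brackets_py query → Spec_has_unbalanced_brackets_py query (has_unbalanced_brackets_py query)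

-- ===== LEMMAS AND PROOFS =====

-- Fusion: A's interleaved loop equals the balance check run on the cleaned suffix.
theorem pvLoopA_eq_balance_clean (cs : List Char) :
    ∀ (stack : List Char) (quote : Option Char) (escaped : Bool),
      pvLoopA cs stack quote escaped = pvBalance (pvClean cs quote escaped) stack := by
  induction cs with
  | nil => intro stack quote escaped; cases quote <;> simp [pvLoopA, pvClean, pvBalance]
  | cons c cs ih =>
    intro stack quote escaped
    cases quote with
    | none =>
      by_cases hq : c = '\'' ∨ c = '"'
      · simp [pvLoopA, pvClean, hq, ih]
      · by_cases ho : c = '(' ∨ c = '[' ∨ c = '{'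
        · simp [pvLoopA, pvClean, hq, ho, pvBalance, ih]
        · by_cases hc : c = ')' ∨ c = ']' ∨ c = '}'
          · simp only [pvLoopA, pvClean, hq, ho, hc, if_false, if_pos,
              pvBalance]
            cases stack.getLast? with
            | none => simp
            | some t => by_cases ht : t = pvPairOf c <;> simp [ht, ih]
          · simp [pvLoopA, pvClean, hq, ho, hc, pvBalance, ih]
    | some q =>
      by_cases he : escaped = true
      · simp [pvLoopA, pvClean, he, ih]
      · simp only [Bool.not_eq_true] at he
        by_cases hb : c = '\\'
        · simp [pvLoopA, pvClean, he, hb, ih]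
        · by_cases hcq : c = q
          · subst hcq; simp [pvLoopA, pvClean, he, hb, ih]
          · simp [pvLoopA, pvClean, he, hb, hcq, ih]

-- ===== VERDICT (by name: the statement is the Claim_ definition above) =====
theorem has_unbalanced_brackets_py_spec : Claim_equal_has_unbalanced_brackets_py := by
  intro query _
  unfold Spec_has_unbalanced_brackets_py has_unbalanced_brackets_py has_unbalanced_brackets_py_alt
  exact pvLoopA_eq_balance_clean query.toList [] none false
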